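-- pv_equiv track=rewrite | github.com/xiaoxue11/hank_practice | Search/05_triplets.py | triplets1
-- ===== SOURCE A (Python) =====
-- def triplets1(a, b, c):
--     count = 0
--     for p in a:
--         for q in b:
--             for r in c:
--                 if p <= q and q >= r:
--                     count += 1
--     return count
-- ===== SOURCE B (Python) =====
-- def triplets1(a, b, c):
--     # factor the triple loop: for each q, multiply the counts of p<=q in a and r<=q in c
--     total = 0
--     for q in b:
--         pa = sum(1 for p in a if p <= q)
--         rc = sum(1 for r in c if r <= q)
--         total += pa * rc
--     return total
-- ===== Notes on version B (the rewrite author's own statement) =====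
-- stated objective: faster
-- what changed: Replaces the triple nested loop by a single loop over b that multiplies, for each q, the count of elements of a that are <= q by the count of elements of c that are <= q.
import Mathlib
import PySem

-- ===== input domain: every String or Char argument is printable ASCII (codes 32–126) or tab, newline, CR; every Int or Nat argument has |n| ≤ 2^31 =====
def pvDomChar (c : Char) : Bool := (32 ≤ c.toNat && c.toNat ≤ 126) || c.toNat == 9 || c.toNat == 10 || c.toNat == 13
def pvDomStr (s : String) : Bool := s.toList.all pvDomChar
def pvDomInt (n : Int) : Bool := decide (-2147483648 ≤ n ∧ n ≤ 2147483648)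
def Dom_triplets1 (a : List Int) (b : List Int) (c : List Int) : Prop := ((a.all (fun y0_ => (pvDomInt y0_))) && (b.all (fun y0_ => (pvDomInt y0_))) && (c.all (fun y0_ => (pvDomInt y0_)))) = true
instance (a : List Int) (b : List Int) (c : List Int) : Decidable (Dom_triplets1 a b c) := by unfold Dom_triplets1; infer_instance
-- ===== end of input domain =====

-- B replaces A's triple nested loop by one loop over b multiplying two linear counts (asymptotically faster).
-- ===== PORT A =====
def triplets1 (a : List Int) (b : List Int) (c : List Int) : Int :=
  a.foldl (fun count p =>
    b.foldl (fun count q =>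
      c.foldl (fun count r =>
        if p ≤ q ∧ q ≥ r then count + 1 else count) count) count) 0

-- ===== PORT B =====
def triplets1_alt (a : List Int) (b : List Int) (c : List Int) : Int :=
  b.foldl (fun total q =>
    total + ((a.countP (fun p => p ≤ q) : Nat) : Int) * ((c.countP (fun r => r ≤ q) : Nat) : Int)) 0

-- ===== PRECONDITION & SPEC =====
def Spec_triplets1 (a : List Int) (b : List Int) (c : List Int) (out : Int) : Prop := out = triplets1_alt a b c
instance (a : List Int) (b : List Int) (c : List Int) (out : Int) : Decidable (Spec_triplets1 a b c out) := by unfold Spec_triplets1; infer_instance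

-- ===== CLAIM (what is proved, stated in full; the proofs are below) =====
def Claim_equal_triplets1 : Prop := ∀ (a : List Int) (b : List Int) (c : List Int), Dom_triplets1 a b c → Spec_triplets1 a b c (triplets1 a b c)

-- ===== LEMMAS AND PROOFS =====

-- ===== VERDICT (by name: the statement is the Claim_ definition above) =====
-- foldl with additive step equals init plus a sum
theorem pv_foldl_add {β : Type} (t : β → Int) (l : List β) (k : Int) :
    l.foldl (fun s x => s + t x) k = k + (l.map t).sum := by
  induction l generalizing k with
  | nil => simp
  | cons x xs ih => simp [List.foldl, ih, add_assoc]

theorem pv_foldl_if_count (P : Int → Prop) [DecidablePred P] (l : List Int) (k : Int) :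
    l.foldl (fun s x => if P x then s + 1 else s) k
      = k + (l.map (fun x => if P x then (1 : Int) else 0)).sum := by
  induction l generalizing k with
  | nil => simp
  | cons x xs ih =>
    simp only [List.foldl, List.map, List.sum_cons]
    by_cases h : P x
    · simp [h, ih, add_assoc]
    · simp [h, ih]

theorem pv_foldl_congr {β : Type} (f g : Int → β → Int) (l : List β) :
    ∀ k : Int, (∀ s x, x ∈ l → f s x = g s x) → l.foldl f k = l.foldl g k := by
  induction l with
  | nil => intro k _; rfl
  | cons x xs ih =>
    intro k h
    simp only [List.foldl]
    rw [h k x (List.mem_cons_self ..)]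
    exact ih _ (fun s y hy => h s y (List.mem_cons_of_mem _ hy))

theorem pv_sum_map_add {β : Type} (f g : β → Int) (l : List β) :
    (l.map (fun x => f x + g x)).sum = (l.map f).sum + (l.map g).sum := by
  induction l with
  | nil => simp
  | cons x xs ih => simp [ih]; ring

theorem pv_sum_swap {α β : Type} (t : α → β → Int) (a : List α) (b : List β) :
    (a.map (fun p => (b.map (fun q => t p q)).sum)).sum
      = (b.map (fun q => (a.map (fun p => t p q)).sum)).sum := by
  induction a with
  | nil => simp
  | cons p a' ih =>
    simp only [List.map, List.sum_cons, ih]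
    rw [← pv_sum_map_add]

theorem pv_sum_if_one (P : Int → Prop) [DecidablePred P] (l : List Int) :
    (l.map (fun x => if P x then (1 : Int) else 0)).sum
      = ((l.countP (fun x => decide (P x)) : Nat) : Int) := by
  induction l with
  | nil => simp
  | cons x xs ih =>
    by_cases h : P x
    · simp [h, ih, add_comm]
    · simp [h, ih]

theorem pv_sum_if_const (P : Int → Prop) [DecidablePred P] (l : List Int) (K : Int) :
    (l.map (fun x => if P x then K else 0)).sum
      = ((l.countP (fun x => decide (P x)) : Nat) : Int) * K := by
  induction l with
  | nil => simp
  | cons x xs ih =>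
    by_cases h : P x
    · simp [h, ih, add_mul]; ring
    · simp [h, ih]

theorem triplets1_as_sum (a b c : List Int) :
    triplets1 a b c
      = (a.map (fun p => (b.map (fun q =>
          (c.map (fun r => if p ≤ q ∧ q ≥ r then (1 : Int) else 0)).sum)).sum)).sum := by
  unfold triplets1
  have hc : ∀ (p q k : Int),
      c.foldl (fun count r => if p ≤ q ∧ q ≥ r then count + 1 else count) k
        = k + (c.map (fun r => if p ≤ q ∧ q ≥ r then (1 : Int) else 0)).sum := by
    intro p q k
    exact pv_foldl_if_count (fun r => p ≤ q ∧ q ≥ r) c k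
  have hb : ∀ (p k : Int),
      b.foldl (fun count q =>
          c.foldl (fun count r => if p ≤ q ∧ q ≥ r then count + 1 else count) count) k
        = k + (b.map (fun q =>
            (c.map (fun r => if p ≤ q ∧ q ≥ r then (1 : Int) else 0)).sum)).sum := by
    intro p k
    have := pv_foldl_add (fun q =>
      (c.map (fun r => if p ≤ q ∧ q ≥ r then (1 : Int) else 0)).sum) b k
    rw [← this]
    exact pv_foldl_congr _ _ b k (fun s q _ => hc p q s)
  have ha : ∀ (k : Int),
      a.foldl (fun count p =>
        b.foldl (fun count q =>
          c.foldl (fun count r => if p ≤ q ∧ q ≥ r then count + 1 else count) count) count) k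
        = k + (a.map (fun p => (b.map (fun q =>
            (c.map (fun r => if p ≤ q ∧ q ≥ r then (1 : Int) else 0)).sum)).sum)).sum := by
    intro k
    have := pv_foldl_add (fun p => (b.map (fun q =>
      (c.map (fun r => if p ≤ q ∧ q ≥ r then (1 : Int) else 0)).sum)).sum) a k
    rw [← this]
    exact pv_foldl_congr _ _ a k (fun s p _ => hb p s)
  simpa using ha 0

theorem triplets1_alt_as_sum (a b c : List Int) :
    triplets1_alt a b c
      = (b.map (fun q => ((a.countP (fun p => p ≤ q) : Nat) : Int)
          * ((c.countP (fun r => r ≤ q) : Nat) : Int))).sum := by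
  unfold triplets1_alt
  simpa using pv_foldl_add (fun q => ((a.countP (fun p => p ≤ q) : Nat) : Int)
    * ((c.countP (fun r => r ≤ q) : Nat) : Int)) b 0

theorem triplets1_eq (a b c : List Int) : triplets1 a b c = triplets1_alt a b c := by
  rw [triplets1_as_sum, triplets1_alt_as_sum, pv_sum_swap]
  apply congrArg
  apply List.map_congr_left
  intro q _
  have h1 : ∀ p : Int,
      (c.map (fun r => if p ≤ q ∧ q ≥ r then (1 : Int) else 0)).sum
        = if p ≤ q then ((c.countP (fun r => r ≤ q) : Nat) : Int) else 0 := by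
    intro p
    by_cases hp : p ≤ q
    · rw [if_pos hp]
      have : (fun r => if p ≤ q ∧ q ≥ r then (1 : Int) else 0)
           = (fun r : Int => if r ≤ q then (1 : Int) else 0) := by
        funext r; by_cases hr : r ≤ q <;> simp [hp, hr, ge_iff_le]
      rw [this]
      simpa using pv_sum_if_one (fun r : Int => r ≤ q) c
    · rw [if_neg hp]
      have : (fun r => if p ≤ q ∧ q ≥ r then (1 : Int) else 0)
           = (fun _ : Int => (0 : Int)) := by
        funext r; simp [hp]
      simp [this]
  calc (a.map (fun p => (c.map (fun r => if p ≤ q ∧ q ≥ r then (1 : Int) else 0)).sum)).sum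
      = (a.map (fun p => if p ≤ q then ((c.countP (fun r => r ≤ q) : Nat) : Int) else 0)).sum := by
        apply congrArg; exact List.map_congr_left (fun p _ => h1 p)
    _ = ((a.countP (fun p => p ≤ q) : Nat) : Int) * ((c.countP (fun r => r ≤ q) : Nat) : Int) := by
        simpa using pv_sum_if_const (fun p : Int => p ≤ q) a
          ((c.countP (fun r => r ≤ q) : Nat) : Int)

-- ===== VERDICT2 =====
theorem triplets1_spec : Claim_equal_triplets1 := by
  intro a b c _
  unfold Spec_triplets1
  exact triplets1_eq a b c
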